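-- pv_equiv track=rewrite | github.com/Tammon23/CSSAdventOfCode | 2015/Day 5/Dec5_P2.py | solve
-- ===== SOURCE A (Python) =====
-- from collections import defaultdict
-- from typing import Iterable
--
-- def solve(data: Iterable[str]) -> int:
--     ans = 0
--     for string in data:
--         overlapping = defaultdict(set)
--         property1 = False
--         for i in range(len(string) - 1):
--             cur = string[i:i + 2]
--
--             if cur in overlapping and len(overlapping[cur] - {(i - 1)}) > 0:
--                 property1 = True
--                 break
--             else:
--                 overlapping[cur].add(i)
--
--         for i in range(len(string) - 2):
--             if string[i] == string[i + 2]: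
--                 break
--         else:
--             continue
--
--         if property1:
--             ans += 1
--
--     return ans
-- ===== SOURCE B (Python) =====
-- def solve(data):
--     ans = 0
--     for s in data:
--         p1 = any(s[i:i + 2] in s[i + 2:] for i in range(len(s) - 1))
--         p2 = any(s[i] == s[i + 2] for i in range(len(s) - 2))
--         if p1 and p2:
--             ans += 1
--     return ans
-- ===== Notes on version B (the rewrite author's own statement) =====
-- stated objective: simpler
-- what changed: Replaces A's maintained defaultdict of pair positions and the break-based for/else with two independent any() scans per string: a substring-membership test s[i:i+2] in s[i+2:] for the repeated non-overlapping pair and a direct s[i]==s[i+2] scan for the xyx pattern.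
import Mathlib
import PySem

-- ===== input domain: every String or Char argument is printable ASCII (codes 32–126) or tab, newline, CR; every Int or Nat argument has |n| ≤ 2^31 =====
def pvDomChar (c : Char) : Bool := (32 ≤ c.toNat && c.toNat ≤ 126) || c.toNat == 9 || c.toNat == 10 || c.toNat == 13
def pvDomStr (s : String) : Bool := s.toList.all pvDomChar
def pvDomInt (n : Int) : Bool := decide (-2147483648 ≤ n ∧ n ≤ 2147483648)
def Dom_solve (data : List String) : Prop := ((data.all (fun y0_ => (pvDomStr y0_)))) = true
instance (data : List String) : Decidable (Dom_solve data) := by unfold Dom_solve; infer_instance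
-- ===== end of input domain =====

-- B replaces A's maintained defaultdict of pair positions and break-based for/else with two
-- independent `any` scans per string (substring search for the repeated pair); objective: simpler.

-- ===== PORT A =====
-- inner loop 1: walks the indices, keeping the defaultdict 'overlapping'; true = break with property1
def solveP1Loop (s : List Char) (d : PySem.Dict (List Char) (PySem.Set Int)) : List Int → Bool
  | [] => false
  | i :: rest =>
    let cur := PySem.List.slice s (some i) (some (i + 2))
    if d.contains cur ∧
        0 < PySem.Set.len (PySem.Set.diff (d.getD cur PySem.Set.empty) (PySem.Set.ofList [i - 1])) then
      true
    else
      solveP1Loop s (d.insert cur (PySem.Set.add (d.getD cur PySem.Set.empty) i)) rest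

-- inner loop 2: true = the loop broke (so the for/else 'continue' is NOT taken)
def solveP2Loop (s : List Char) : List Int → Bool
  | [] => false
  | i :: rest =>
    if PySem.List.pyGetD s i ' ' = PySem.List.pyGetD s (i + 2) ' ' then true
    else solveP2Loop s rest

def solve (data : List String) : Int :=
  data.foldl (fun ans string =>
    let s := string.toList
    let property1 := solveP1Loop s PySem.Dict.empty (PySem.List.pyRange 0 ((s.length : Int) - 1) 1)
    let broke2 := solveP2Loop s (PySem.List.pyRange 0 ((s.length : Int) - 2) 1)
    if broke2 then (if property1 then ans + 1 else ans) else ans) 0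

-- ===== PORT B =====
def solveAltP1 (s : List Char) : Bool :=
  (PySem.List.pyRange 0 ((s.length : Int) - 1) 1).any (fun i =>
    PySem.Chars.isIn (PySem.List.slice s (some i) (some (i + 2)))
      (PySem.List.slice s (some (i + 2)) none))

def solveAltP2 (s : List Char) : Bool :=
  (PySem.List.pyRange 0 ((s.length : Int) - 2) 1).any (fun i =>
    PySem.List.pyGetD s i ' ' == PySem.List.pyGetD s (i + 2) ' ')

def solve_alt (data : List String) : Int :=
  data.foldl (fun ans string =>
    let s := string.toList
    if solveAltP1 s && solveAltP2 s then ans + 1 else ans) 0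

-- ===== PRECONDITION & SPEC =====
def Spec_solve (data : List String) (out : Int) : Prop := out = solve_alt data
instance (data : List String) (out : Int) : Decidable (Spec_solve data out) := by unfold Spec_solve; infer_instance

-- ===== CLAIM (what is proved, stated in full; the proofs are below) =====
def Claim_equal_solve : Prop := ∀ (data : List String), Dom_solve data → Spec_solve data (solve data)

-- ===== LEMMAS AND PROOFS =====

/-- the pair of characters starting at index j -/
def pairAt (s : List Char) (j : Nat) : List Char := (s.drop j).take 2

/-- the invariant A's defaultdict satisfies before processing index i₀ -/
def dictInv (s : List Char) (i₀ : Nat) (d : PySem.Dict (List Char) (PySem.Set Int)) : Prop :=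
  (∀ c (x : Int), x ∈ d.getD c PySem.Set.empty ↔ ∃ j : Nat, j < i₀ ∧ pairAt s j = c ∧ x = (j : Int)) ∧
  (∀ c, d.contains c = true ↔ ∃ j : Nat, j < i₀ ∧ pairAt s j = c)

lemma slice_pairAt (s : List Char) (j : Nat) :
    PySem.List.slice s (some (j : Int)) (some ((j : Int) + 2)) = pairAt s j := by
  have h := PySem.List.slice_natCast_add s j 2
  simpa [pairAt] using h

lemma dictInv_empty (s : List Char) : dictInv s 0 PySem.Dict.empty := by
  constructor
  · intro c x
    simp [PySem.Dict.getD, PySem.Dict.get?_empty, PySem.Set.empty]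
  · intro c
    simp [PySem.Dict.contains, PySem.Dict.empty]

lemma dictInv_step (s : List Char) (i₀ : Nat) (d : PySem.Dict (List Char) (PySem.Set Int))
    (h : dictInv s i₀ d) :
    dictInv s (i₀ + 1)
      (d.insert (pairAt s i₀) (PySem.Set.add (d.getD (pairAt s i₀) PySem.Set.empty) (i₀ : Int))) := by
  obtain ⟨h1, h2⟩ := h
  constructor
  · intro c x
    rw [PySem.Dict.getD_insert]
    by_cases hc : c = pairAt s i₀
    · subst hc
      rw [if_pos rfl, PySem.Set.mem_add, h1]
      constructor
      · rintro (⟨j, hj, hp, hx⟩ | hx)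
        · exact ⟨j, by omega, hp, hx⟩
        · exact ⟨i₀, by omega, rfl, hx⟩
      · rintro ⟨j, hj, hp, hx⟩
        by_cases hj' : j = i₀
        · subst hj'; exact Or.inr hx
        · exact Or.inl ⟨j, by omega, hp, hx⟩
    · rw [if_neg hc, h1]
      constructor
      · rintro ⟨j, hj, hp, hx⟩; exact ⟨j, by omega, hp, hx⟩
      · rintro ⟨j, hj, hp, hx⟩
        refine ⟨j, ?_, hp, hx⟩
        rcases Nat.lt_succ_iff_lt_or_eq.mp hj with h' | h'
        · exact h'
        · exact absurd (h' ▸ hp).symm hc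
  · intro c
    rw [PySem.Dict.contains_insert]
    by_cases hc : c = pairAt s i₀
    · subst hc
      simp only [beq_self_eq_true, Bool.true_or, true_iff]
      exact ⟨i₀, by omega, rfl⟩
    · have hb : (c == pairAt s i₀) = false := beq_eq_false_iff_ne.mpr hc
      rw [hb, Bool.false_or, h2]
      constructor
      · rintro ⟨j, hj, hp⟩; exact ⟨j, by omega, hp⟩
      · rintro ⟨j, hj, hp⟩
        refine ⟨j, ?_, hp⟩
        rcases Nat.lt_succ_iff_lt_or_eq.mp hj with h' | h'
        · exact h'
        · exact absurd (h' ▸ hp).symm hc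

/-- A's break condition at index i₀ holds iff some pair strictly before i₀ - 1 repeats at i₀ -/
lemma break_cond (s : List Char) (i₀ : Nat) (d : PySem.Dict (List Char) (PySem.Set Int))
    (h : dictInv s i₀ d) :
    (d.contains (pairAt s i₀) = true ∧
      0 < PySem.Set.len (PySem.Set.diff (d.getD (pairAt s i₀) PySem.Set.empty)
        (PySem.Set.ofList [(i₀ : Int) - 1]))) ↔
    ∃ j : Nat, j + 2 ≤ i₀ ∧ pairAt s j = pairAt s i₀ := by
  obtain ⟨h1, h2⟩ := h
  constructor
  · rintro ⟨_, hlen⟩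
    have hex : ∃ x ∈ d.getD (pairAt s i₀) PySem.Set.empty, ¬ x = (i₀ : Int) - 1 := by
      by_contra hno
      push_neg at hno
      have hnil : PySem.Set.diff (d.getD (pairAt s i₀) PySem.Set.empty)
          (PySem.Set.ofList [(i₀ : Int) - 1]) = [] := by
        simp only [PySem.Set.diff]
        rw [List.filter_eq_nil_iff]
        intro x hx
        simp [PySem.Set.contains, hno x hx, PySem.Set.ofList, PySem.Set.add, PySem.Set.empty]
      rw [hnil] at hlen
      simp [PySem.Set.len] at hlen
    obtain ⟨x, hx, hne⟩ := hex
    obtain ⟨j, hj, hp, rfl⟩ := (h1 _ x).mp hx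
    exact ⟨j, by omega, hp⟩
  · rintro ⟨j, hj, hp⟩
    have hmem : ((j : Int)) ∈ d.getD (pairAt s i₀) PySem.Set.empty :=
      (h1 _ _).mpr ⟨j, by omega, hp, rfl⟩
    refine ⟨(h2 _).mpr ⟨j, by omega, hp⟩, ?_⟩
    have hmemf : ((j : Int)) ∈ PySem.Set.diff (d.getD (pairAt s i₀) PySem.Set.empty)
        (PySem.Set.ofList [(i₀ : Int) - 1]) := by
      simp only [PySem.Set.diff, List.mem_filter]
      refine ⟨hmem, ?_⟩
      simp only [PySem.Set.contains, PySem.Set.ofList, PySem.Set.add, PySem.Set.empty]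
      simp
      omega
    have hpos := List.length_pos_of_mem hmemf
    simp only [PySem.Set.len]
    exact_mod_cast hpos

/-- A's first inner loop decides the repeated-non-overlapping-pair existential -/
lemma solveP1Loop_spec (s : List Char) :
    ∀ (m i₀ : Nat) (d : PySem.Dict (List Char) (PySem.Set Int)), dictInv s i₀ d →
    (solveP1Loop s d (List.map (fun j : Nat => (j : Int)) (List.range' i₀ m)) = true ↔
      ∃ i j : Nat, i₀ ≤ i ∧ i < i₀ + m ∧ j + 2 ≤ i ∧ pairAt s j = pairAt s i) := by
  intro m
  induction m with
  | zero =>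
    intro i₀ d _
    simp only [List.range', List.map_nil, solveP1Loop]
    constructor
    · intro h; exact absurd h (by simp)
    · rintro ⟨i, j, h1, h2, _, _⟩; omega
  | succ m ih =>
    intro i₀ d hinv
    rw [List.range'_succ]
    simp only [List.map_cons, solveP1Loop, slice_pairAt]
    by_cases hbr : d.contains (pairAt s i₀) = true ∧
        0 < PySem.Set.len (PySem.Set.diff (d.getD (pairAt s i₀) PySem.Set.empty)
          (PySem.Set.ofList [(i₀ : Int) - 1]))
    · rw [if_pos hbr]
      obtain ⟨j, hj, hp⟩ := (break_cond s i₀ d hinv).mp hbr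
      simp only [true_iff]
      exact ⟨i₀, j, by omega, by omega, hj, hp⟩
    · rw [if_neg hbr]
      rw [ih (i₀ + 1) _ (dictInv_step s i₀ d hinv)]
      have hno : ¬ ∃ j : Nat, j + 2 ≤ i₀ ∧ pairAt s j = pairAt s i₀ :=
        fun hc => hbr ((break_cond s i₀ d hinv).mpr hc)
      constructor
      · rintro ⟨i, j, hi1, hi2, hj, hp⟩
        exact ⟨i, j, by omega, by omega, hj, hp⟩
      · rintro ⟨i, j, hi1, hi2, hj, hp⟩
        rcases Nat.lt_or_ge i₀ i with h' | h'
        · exact ⟨i, j, by omega, by omega, hj, hp⟩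
        · have hii : i = i₀ := by omega
          subst hii
          exact absurd ⟨j, hj, hp⟩ hno

/-- a length-2 list is an infix of t iff it occurs as (t.drop k).take 2 for some admissible k -/
lemma infix_two_iff (u t : List Char) (hu : u.length = 2) :
    u <:+: t ↔ ∃ k : Nat, k + 2 ≤ t.length ∧ (t.drop k).take 2 = u := by
  constructor
  · rintro ⟨p, q, rfl⟩
    refine ⟨p.length, by simp; omega, ?_⟩
    rw [List.append_assoc, List.drop_left, ← hu, List.take_left]
  · rintro ⟨k, hk, rfl⟩
    exact ((List.take_prefix _ _).isInfix.trans (List.drop_suffix k t).isInfix)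

lemma pairAt_length (s : List Char) (i : Nat) (h : i + 2 ≤ s.length) :
    (pairAt s i).length = 2 := by
  simp [pairAt]
  omega

/-- B's substring test at index i detects a later non-overlapping occurrence of pair i -/
lemma isIn_spec (s : List Char) (i : Nat) (hi : i + 2 ≤ s.length) :
    PySem.Chars.isIn (pairAt s i) (s.drop (i + 2)) = true ↔
      ∃ j : Nat, i + 2 ≤ j ∧ j + 2 ≤ s.length ∧ pairAt s j = pairAt s i := by
  rw [PySem.Chars.isIn_iff_infix, infix_two_iff _ _ (pairAt_length s i hi)]
  have hd : (s.drop (i + 2)).length = s.length - (i + 2) := List.length_drop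
  constructor
  · rintro ⟨k, hk, hp⟩
    refine ⟨i + 2 + k, by omega, by omega, ?_⟩
    rw [← hp, pairAt, List.drop_drop]
  · rintro ⟨j, hj1, hj2, hp⟩
    refine ⟨j - (i + 2), by omega, ?_⟩
    rw [List.drop_drop, ← hp, pairAt]
    congr 2
    omega

lemma pyRange_len_sub1 (n : Nat) :
    PySem.List.pyRange 0 ((n : Int) - 1) 1 = List.map (fun j : Nat => (j : Int)) (List.range (n - 1)) := by
  cases n with
  | zero => rfl
  | succ m =>
    have h : ((m + 1 : Nat) : Int) - 1 = ((m : Nat) : Int) := by push_cast; ring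
    rw [h, PySem.List.pyRange_zero_natCast]
    simp only [Nat.add_sub_cancel]

/-- B's first scan decides the same existential as A's first loop (indices swapped) -/
lemma solveAltP1_spec (s : List Char) :
    solveAltP1 s = true ↔
      ∃ i j : Nat, i + 1 < s.length ∧ j + 2 ≤ i ∧ pairAt s j = pairAt s i := by
  unfold solveAltP1
  rw [pyRange_len_sub1 s.length, List.any_eq_true]
  constructor
  · rintro ⟨x, hx, hf⟩
    obtain ⟨i, hi, rfl⟩ := List.mem_map.mp hx
    rw [List.mem_range] at hi
    have hi2 : i + 2 ≤ s.length := by omega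
    rw [slice_pairAt] at hf
    rw [show PySem.List.slice s (some ((i : Int) + 2)) none = s.drop (i + 2) by
      rw [show ((i : Int) + 2) = ((i + 2 : Nat) : Int) by push_cast; ring, PySem.List.slice_from_natCast]] at hf
    rw [isIn_spec s i hi2] at hf
    obtain ⟨j, hj1, hj2, hp⟩ := hf
    exact ⟨j, i, by omega, by omega, hp.symm⟩
  · rintro ⟨i, j, hi, hj, hp⟩
    refine ⟨(j : Int), List.mem_map.mpr ⟨j, List.mem_range.mpr (by omega), rfl⟩, ?_⟩
    rw [slice_pairAt]
    rw [show PySem.List.slice s (some ((j : Int) + 2)) none = s.drop (j + 2) by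
      rw [show ((j : Int) + 2) = ((j + 2 : Nat) : Int) by push_cast; ring, PySem.List.slice_from_natCast]]
    rw [isIn_spec s j (by omega)]
    exact ⟨i, by omega, by omega, hp.symm⟩

/-- A's first loop (from the empty dict, over the full range) equals B's first scan -/
lemma p1_eq (s : List Char) :
    solveP1Loop s PySem.Dict.empty (PySem.List.pyRange 0 ((s.length : Int) - 1) 1) =
      solveAltP1 s := by
  rw [Bool.eq_iff_iff, pyRange_len_sub1 s.length, List.range_eq_range',
    solveP1Loop_spec s (s.length - 1) 0 PySem.Dict.empty (dictInv_empty s), solveAltP1_spec]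
  constructor
  · rintro ⟨i, j, _, hi, hj, hp⟩
    exact ⟨i, j, by omega, hj, hp⟩
  · rintro ⟨i, j, hi, hj, hp⟩
    exact ⟨i, j, by omega, by omega, hj, hp⟩

/-- A's break-based second loop is an `any` -/
lemma p2_any (s : List Char) (l : List Int) :
    solveP2Loop s l = l.any (fun i => PySem.List.pyGetD s i ' ' == PySem.List.pyGetD s (i + 2) ' ') := by
  induction l with
  | nil => rfl
  | cons i rest ih =>
    simp only [solveP2Loop, List.any_cons]
    by_cases h : PySem.List.pyGetD s i ' ' = PySem.List.pyGetD s (i + 2) ' '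
    · simp [h]
    · simp [h, ih, beq_eq_false_iff_ne.mpr h]

/-- A's second loop over the full range equals B's second scan -/
lemma p2_eq (s : List Char) :
    solveP2Loop s (PySem.List.pyRange 0 ((s.length : Int) - 2) 1) = solveAltP2 s := by
  rw [p2_any]
  rfl

-- ===== VERDICT (by name: the statement is the Claim_ definition above) =====
theorem solve_spec : Claim_equal_solve := by
  intro data _
  unfold Spec_solve solve solve_alt
  apply PySem.List.foldl_congr_mem
  intro acc str _
  dsimp only
  rw [p1_eq, p2_eq]
  cases solveAltP1 str.toList <;> cases solveAltP2 str.toList <;> simp
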